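-- pv_equiv track=rewrite | github.com/theabbie/leetcode | miscellaneous/xorless.py | count
-- ===== SOURCE A (Python) =====
-- def count(n):
--     vals = []
--     for i in range(1, 10 * n + 1):
--         if (i ^ n) < n:
--             vals.append(i)
--     res = []
--     m = len(vals)
--     i = 0
--     while i < m:
--         ctr = 1
--         while i < m - 1 and vals[i + 1] == vals[i] + 1:
--             i += 1
--             ctr += 1
--         res.append((vals[i] - ctr + 1, vals[i]))
--         i += 1
--     return res
-- ===== SOURCE B (Python) =====
-- def count(n):
--     # Scan the set bits of n from low to high: i^n < n exactly when the top bit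
--     # of i is a set bit of n, so the answer is the maximal runs of consecutive
--     # set bits p..q of n, each giving the interval (2**p, 2**(q+1) - 1).
--     res = []
--     lo = None
--     p = 0
--     m = n
--     while m > 0:
--         if m % 2 == 1:
--             if lo is None:
--                 lo = 2 ** p
--         else:
--             if lo is not None:
--                 res.append((lo, 2 ** p - 1))
--                 lo = None
--         m //= 2
--         p += 1
--     if lo is not None:
--         res.append((lo, 2 ** p - 1))
--     return res
-- ===== Notes on version B (the rewrite author's own statement) =====
-- stated objective: faster
-- what changed: Instead of scanning all of [1,10n] testing (i^n)<n and then merging consecutive hits, B walks the bits of n once, emitting one interval per maximal run of consecutive set bits (i^n<n iff the top bit of i is a set bit of n).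
import Mathlib
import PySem

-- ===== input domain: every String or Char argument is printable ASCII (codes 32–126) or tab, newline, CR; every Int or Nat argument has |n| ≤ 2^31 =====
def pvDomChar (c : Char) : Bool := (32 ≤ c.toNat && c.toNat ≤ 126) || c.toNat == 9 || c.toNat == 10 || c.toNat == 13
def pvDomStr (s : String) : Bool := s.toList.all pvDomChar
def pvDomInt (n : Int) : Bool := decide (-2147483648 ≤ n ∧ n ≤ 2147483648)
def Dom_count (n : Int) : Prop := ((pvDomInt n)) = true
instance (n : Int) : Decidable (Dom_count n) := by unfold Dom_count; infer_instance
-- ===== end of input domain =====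

-- B replaces A's O(n) scan of [1,10n] (filter + run-merging) by a walk over the bits of n,
-- emitting one interval per maximal run of consecutive set bits (objective: faster).

-- ===== PORT A =====
-- A's run-merging while-loops: the outer loop starts a run at vals[i] with ctr = 1, the
-- inner loop consumes consecutive successors incrementing ctr; ported as recursion over vals.
def goA (x ctr : Int) : List Int → List (Int × Int)
  | [] => [(x - ctr + 1, x)]
  | y :: rest => if y = x + 1 then goA y (ctr + 1) rest else (x - ctr + 1, x) :: goA y 1 rest

def runsA : List Int → List (Int × Int)
  | [] => []
  | x :: rest => goA x 1 rest

def count (n : Int) : List (Int × Int) :=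
  let vals := (PySem.List.pyRange 1 (10 * n + 1) 1).filter (fun i => PySem.Int.bxor i n < n)
  runsA vals

-- ===== PORT B =====
-- Source B's while loop: m runs over the bits of n (low to high), p is the bit position,
-- lo is the start of the currently open run of set bits (None if no run is open).
def altGo (m : Int) (p : Nat) (lo : Option Int) (res : List (Int × Int)) : List (Int × Int) :=
  if 0 < m then
    if PySem.Int.mod m 2 = 1 then
      altGo (PySem.Int.floordiv m 2) (p + 1)
        (match lo with | none => some ((2:Int) ^ p) | some l => some l) res
    else
      match lo with
      | some l => altGo (PySem.Int.floordiv m 2) (p + 1) none (res ++ [(l, (2:Int) ^ p - 1)])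
      | none => altGo (PySem.Int.floordiv m 2) (p + 1) none res
  else
    match lo with
    | some l => res ++ [(l, (2:Int) ^ p - 1)]
    | none => res
termination_by m.toNat
decreasing_by all_goals (rw [PySem.Int.floordiv_eq_ediv_of_pos (by norm_num)]; omega)

def count_alt (n : Int) : List (Int × Int) := altGo n 0 none []

-- ===== PRECONDITION & SPEC =====
def Spec_count (n : Int) (out : List (Int × Int)) : Prop := out = count_alt n
instance (n : Int) (out : List (Int × Int)) : Decidable (Spec_count n out) := by unfold Spec_count; infer_instance

-- ===== CLAIM (what is proved, stated in full; the proofs are below) =====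
def Claim_equal_count : Prop := ∀ (n : Int), Dom_count n → Spec_count n (count n)

-- ===== LEMMAS AND PROOFS =====

-- the block of naturals whose highest set bit is p: [2^p, 2^(p+1)-1]
def blockP (p : Nat) : List Nat := List.range' (2 ^ p) (2 ^ p)

-- ascending list of set-bit positions of m
def bitsL (m : Nat) : List Nat :=
  if m = 0 then [] else (if m % 2 = 1 then [0] else []) ++ (bitsL (m / 2)).map (· + 1)
decreasing_by omega

-- run-merging over set-bit positions: open run started at bit a, last set bit b
def mgo (a b : Nat) : List Nat → List (Int × Int)
  | [] => [((2:Int) ^ a, (2:Int) ^ (b + 1) - 1)]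
  | q :: t => if q = b + 1 then mgo a q t else ((2:Int) ^ a, (2:Int) ^ (b + 1) - 1) :: mgo q q t

def mergePos : List Nat → List (Int × Int)
  | [] => []
  | p :: t => mgo p p t

lemma log2_of_block {i p : Nat} (h1 : 2 ^ p ≤ i) (h2 : i < 2 ^ (p + 1)) : i.log2 = p := by
  have hi : i ≠ 0 := by have : 0 < 2 ^ p := Nat.two_pow_pos p; omega
  have hlo : p ≤ i.log2 := (Nat.le_log2 hi).2 h1
  have hhi : i.log2 < p + 1 := (Nat.log2_lt hi).2 h2
  omega

lemma testBit_top {i p : Nat} (h1 : 2 ^ p ≤ i) (h2 : i < 2 ^ (p + 1)) : i.testBit p = true := by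
  have hd : i / 2 ^ p = 1 := by
    have h3 : 2 ^ (p + 1) = 2 ^ p * 2 := by ring
    refine Nat.div_eq_of_lt_le (by simpa using h1) (by omega)
  have := Nat.testBit_div_two_pow (n := p) i 0
  rw [hd] at this
  simpa using this.symm

-- the crux: i^n < n exactly when n has a set bit at the position of i's top bit
lemma xor_lt_iff (m i : Nat) (hi : 1 ≤ i) : ((i ^^^ m) < m ↔ m.testBit i.log2 = true) := by
  set b := i.log2 with hb
  have hi0 : i ≠ 0 := by omega
  have h1 : 2 ^ b ≤ i := Nat.log2_self_le hi0
  have h2 : i < 2 ^ (b + 1) := Nat.lt_log2_self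
  have hib : i.testBit b = true := testBit_top h1 h2
  have hhigh : ∀ j, b < j → i.testBit j = false := fun j hj =>
    Nat.testBit_lt_two_pow (lt_of_lt_of_le h2 (Nat.pow_le_pow_right (by norm_num) hj))
  constructor
  · intro hlt
    by_contra hmb
    have hmb' : m.testBit b = false := by simpa using hmb
    have : m < i ^^^ m := by
      refine Nat.lt_of_testBit b hmb' ?_ ?_
      · simp [Nat.testBit_xor, hib, hmb']
      · intro j hj; simp [Nat.testBit_xor, hhigh j hj]
    omega
  · intro hmb
    refine Nat.lt_of_testBit b ?_ hmb ?_
    · simp [Nat.testBit_xor, hib, hmb]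
    · intro j hj; simp [Nat.testBit_xor, hhigh j hj]

lemma rangeBlocks (k : Nat) : List.range' 1 (2 ^ k - 1) = (List.range k).flatMap blockP := by
  induction k with
  | zero => rfl
  | succ k ih =>
    have h1 : (1:Nat) ≤ 2 ^ k := Nat.one_le_two_pow
    rw [List.range_succ, List.flatMap_append, ← ih]
    simp only [List.flatMap_cons, List.flatMap_nil, List.append_nil, blockP]
    have := List.range'_append (s := 1) (m := 2 ^ k - 1) (n := 2 ^ k) (step := 1)
    rw [show 1 + 1 * (2 ^ k - 1) = 2 ^ k by omega,
      show 2 ^ k - 1 + 2 ^ k = 2 ^ (k+1) - 1 by rw [pow_succ]; omega] at this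
    exact this.symm

lemma filter_flatMap {α β : Type} (l : List α) (f : α → List β) (p : β → Bool) :
    (l.flatMap f).filter p = l.flatMap (fun x => (f x).filter p) := by
  induction l with
  | nil => rfl
  | cons a t ih => simp [List.flatMap_cons, List.filter_append, ih]

lemma mem_blockP {i p : Nat} (h : i ∈ blockP p) : 2 ^ p ≤ i ∧ i < 2 ^ (p + 1) ∧ 1 ≤ i := by
  rw [blockP, List.mem_range'_1] at h
  have : 0 < 2 ^ p := Nat.two_pow_pos p
  refine ⟨by omega, ?_, by omega⟩
  rw [pow_succ]; omega

lemma blockFilter (m p : Nat) :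
    (blockP p).filter (fun i => decide ((i ^^^ m) < m)) = if m.testBit p then blockP p else [] := by
  by_cases hb : m.testBit p
  · rw [if_pos hb, List.filter_eq_self]
    intro i hi
    obtain ⟨h1, h2, h3⟩ := mem_blockP hi
    simp only [decide_eq_true_eq]
    rw [xor_lt_iff m i h3, log2_of_block h1 h2]; exact hb
  · rw [if_neg hb, List.filter_eq_nil_iff]
    intro i hi
    obtain ⟨h1, h2, h3⟩ := mem_blockP hi
    simp only [decide_eq_true_eq]
    rw [xor_lt_iff m i h3, log2_of_block h1 h2]
    simpa using hb

lemma flatMapIte (m : Nat) (l : List Nat) :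
    l.flatMap (fun p => if m.testBit p then blockP p else []) =
      (l.filter (fun p => m.testBit p)).flatMap blockP := by
  induction l with
  | nil => rfl
  | cons a t ih => by_cases h : m.testBit a <;> simp [List.flatMap_cons, h, ih]

lemma bits_eq_filter : ∀ k m, m < 2 ^ k → bitsL m = (List.range k).filter (fun p => m.testBit p) := by
  intro k
  induction k with
  | zero => intro m hm; interval_cases m; simp [bitsL]
  | succ k ih =>
    intro m hm
    by_cases h0 : m = 0
    · subst h0; simp [bitsL]
    · rw [bitsL, if_neg h0, List.range_succ_eq_map]
      rw [List.filter_cons, List.filter_map]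
      have hcomp : ((fun p => m.testBit p) ∘ Nat.succ) = fun p => (m / 2).testBit p := by
        funext p; simp [Nat.testBit_succ]
      rw [hcomp, ← ih (m / 2) (by omega)]
      by_cases hp : m % 2 = 1
      · have : m.testBit 0 = true := by simp [Nat.testBit_zero, hp]
        simp [hp, this]
      · have : m.testBit 0 = false := by simp [Nat.testBit_zero]; omega
        simp [hp, this]

lemma bits_pairwise (m : Nat) : (bitsL m).Pairwise (· < ·) := by
  rw [bits_eq_filter m m Nat.lt_two_pow_self]
  exact List.pairwise_lt_range.filter _

-- A's filtered list, in Nat form: exactly the blocks of the set bits of m, in order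
lemma valsNat (m : Nat) (hm : 1 ≤ m) :
    (List.range' 1 (10 * m)).filter (fun i => decide ((i ^^^ m) < m)) = (bitsL m).flatMap blockP := by
  set L := m.log2 with hL
  have hmlt : m < 2 ^ (L + 1) := Nat.lt_log2_self
  have hle : 2 ^ L ≤ m := Nat.log2_self_le (by omega)
  have hp1 : 2 ^ (L + 1) = 2 ^ L * 2 := by ring
  have hsplit : List.range' 1 (10 * m) =
      List.range' 1 (2 ^ (L+1) - 1) ++ List.range' (2 ^ (L+1)) (10 * m - (2 ^ (L+1) - 1)) := by
    have h := List.range'_append (s := 1) (m := 2 ^ (L+1) - 1) (n := 10 * m - (2 ^ (L+1) - 1)) (step := 1)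
    rw [show 1 + 1 * (2 ^ (L+1) - 1) = 2 ^ (L+1) by have := Nat.two_pow_pos (L+1); omega] at h
    rw [h]
    congr 1
    omega
  rw [hsplit, List.filter_append]
  have htail : (List.range' (2 ^ (L+1)) (10 * m - (2 ^ (L+1) - 1))).filter
      (fun i => decide ((i ^^^ m) < m)) = [] := by
    rw [List.filter_eq_nil_iff]
    intro i hi
    rw [List.mem_range'_1] at hi
    have hige : 2 ^ (L+1) ≤ i := hi.1
    have hi1 : 1 ≤ i := by have := Nat.two_pow_pos (L+1); omega
    have hlog : L + 1 ≤ i.log2 := (Nat.le_log2 (by omega)).2 hige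
    have hmlt2 : m < 2 ^ i.log2 := lt_of_lt_of_le hmlt (Nat.pow_le_pow_right (by norm_num) hlog)
    simp only [decide_eq_true_eq]
    rw [xor_lt_iff m i hi1, Nat.testBit_lt_two_pow hmlt2]
    exact Bool.false_ne_true
  rw [htail, List.append_nil, rangeBlocks, filter_flatMap]
  simp only [blockFilter]
  rw [flatMapIte, ← bits_eq_filter (L+1) m hmlt]

-- goA consumes a contiguous run of successors, only incrementing ctr
lemma goA_consume : ∀ (k x : Nat) (ctr : Int) (rest : List Int),
    goA (x : Int) ctr (((List.range' (x + 1) k).map (fun (j : Nat) => (j : Int))) ++ rest) =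
      goA ((x + k : Nat) : Int) (ctr + (k : Int)) rest := by
  intro k
  induction k with
  | zero => intro x ctr rest; simp
  | succ k ih =>
    intro x ctr rest
    rw [List.range'_succ, List.map_cons, List.cons_append, goA]
    rw [if_pos (by push_cast; ring)]
    rw [ih (x + 1) (ctr + 1) rest]
    rw [show x + 1 + k = x + (k + 1) by omega]
    congr 1
    push_cast; ring

-- a non-contiguous block start closes the current run and opens a new one
lemma goA_block (q : Nat) (x ctr : Int) (rest : List Int)
    (hne : ((2 ^ q : Nat) : Int) ≠ x + 1) :
    goA x ctr (((blockP q).map (fun (j : Nat) => (j : Int))) ++ rest) =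
      (x - ctr + 1, x) :: goA ((2:Int) ^ (q + 1) - 1) ((2:Int) ^ (q + 1) - 2 ^ q) rest := by
  obtain ⟨y, hy⟩ : ∃ y, (2:Nat) ^ q = y + 1 := ⟨2 ^ q - 1, by have := Nat.two_pow_pos q; omega⟩
  have hyi : ((2:Int) ^ q) = (y : Int) + 1 := by exact_mod_cast hy
  rw [blockP, hy, List.range'_succ, List.map_cons, List.cons_append, goA]
  rw [if_neg (by rw [← hy]; exact hne)]
  congr 1
  rw [goA_consume y (y + 1) 1 rest]
  congr 1
  · push_cast
    rw [pow_succ]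
    linarith
  · rw [pow_succ]
    linarith

lemma goA_blocks : ∀ (rest : List Nat) (a b : Nat), (b :: rest).Pairwise (· < ·) →
    goA ((2:Int) ^ (b + 1) - 1) ((2:Int) ^ (b + 1) - (2:Int) ^ a)
        ((rest.flatMap blockP).map (fun (j : Nat) => (j : Int))) = mgo a b rest := by
  intro rest
  induction rest with
  | nil =>
    intro a b _
    rw [List.flatMap_nil, List.map_nil, goA, mgo]
    congr 2
    ring
  | cons q t ih =>
    intro a b hpw
    have hbq : b < q := (List.pairwise_cons.1 hpw).1 q (by simp)
    have hpwq : (q :: t).Pairwise (· < ·) := (List.pairwise_cons.1 hpw).2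
    rw [List.flatMap_cons, List.map_append]
    by_cases hq : q = b + 1
    · subst hq
      obtain ⟨y, hy⟩ : ∃ y, (2:Nat) ^ (b + 1) = y + 1 :=
        ⟨2 ^ (b + 1) - 1, by have := Nat.two_pow_pos (b + 1); omega⟩
      have hyi : ((2:Int) ^ (b + 1)) = (y : Int) + 1 := by exact_mod_cast hy
      rw [blockP, hy]
      rw [show (2:Int) ^ (b + 1) - 1 = ((y : Nat) : Int) by rw [hyi]; ring]
      rw [goA_consume (y + 1) y _ _]
      rw [mgo, if_pos rfl]
      rw [show ((y + (y + 1) : Nat) : Int) = (2:Int) ^ (b + 1 + 1) - 1 by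
        push_cast; rw [show (2:Int) ^ (b + 1 + 1) = 2 ^ (b + 1) * 2 from pow_succ 2 (b + 1)]; linarith]
      rw [show (2:Int) ^ (b + 1) - 2 ^ a + ((y + 1 : Nat) : Int) = (2:Int) ^ (b + 1 + 1) - 2 ^ a by
        push_cast; rw [show (2:Int) ^ (b + 1 + 1) = 2 ^ (b + 1) * 2 from pow_succ 2 (b + 1)]; linarith]
      exact ih a (b + 1) hpwq
    · rw [goA_block q _ _ _ (by
        intro hcon
        have h2 : ((2 ^ q : Nat) : Int) = (2:Int) ^ (b + 1) := by rw [hcon]; ring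
        have h3 : (2:Nat) ^ q = 2 ^ (b + 1) := by exact_mod_cast h2
        exact hq (Nat.pow_right_injective (by norm_num) h3))]
      rw [mgo, if_neg hq]
      congr 1
      · congr 1; ring
      · exact ih q q (List.pairwise_cons.2
          ⟨fun r hr => (List.pairwise_cons.1 hpwq).1 r hr, (List.pairwise_cons.1 hpwq).2⟩)

lemma runsA_blocks (ps : List Nat) (h : ps.Pairwise (· < ·)) :
    runsA ((ps.flatMap blockP).map (fun (j : Nat) => (j : Int))) = mergePos ps := by
  cases ps with
  | nil => rfl
  | cons p t =>
    obtain ⟨y, hy⟩ : ∃ y, (2:Nat) ^ p = y + 1 := ⟨2 ^ p - 1, by have := Nat.two_pow_pos p; omega⟩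
    have hyi : ((2:Int) ^ p) = (y : Int) + 1 := by exact_mod_cast hy
    rw [List.flatMap_cons, List.map_append, blockP, hy, List.range'_succ, List.map_cons,
      List.cons_append, runsA]
    rw [goA_consume y (y + 1) 1 ((t.flatMap blockP).map (fun (j : Nat) => (j : Int)))]
    rw [show ((y + 1 + y : Nat) : Int) = (2:Int) ^ (p + 1) - 1 by
      push_cast; rw [show (2:Int) ^ (p + 1) = 2 ^ p * 2 from pow_succ 2 p]; linarith]
    rw [show (1 : Int) + ((y : Nat) : Int) = (2:Int) ^ (p + 1) - 2 ^ p by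
      rw [show (2:Int) ^ (p + 1) = 2 ^ p * 2 from pow_succ 2 p]; linarith]
    rw [mergePos]
    exact goA_blocks t p p h

lemma mgo_of_gt (a b : Nat) (rest : List Nat) (h : ∀ q ∈ rest, b + 1 < q) :
    mgo a b rest = ((2:Int) ^ a, (2:Int) ^ (b + 1) - 1) :: mergePos rest := by
  cases rest with
  | nil => rfl
  | cons q t =>
    have : q ≠ b + 1 := by have := h q (by simp); omega
    simp [mgo, this, mergePos]

lemma map_shift (l : List Nat) (p : Nat) : (l.map (· + 1)).map (· + p) = l.map (· + (p + 1)) := by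
  rw [List.map_map]
  apply List.map_congr_left
  intro a _
  simp
  omega

-- B's loop invariant: altGo at bit position p (resp. inside an open run) produces exactly
-- the merged intervals of the remaining set bits, shifted by p
lemma altGo_inv : ∀ m : Nat,
    (∀ (p : Nat) (res : List (Int × Int)),
      altGo (m : Int) p none res = res ++ mergePos ((bitsL m).map (· + p))) ∧
    (∀ (a b : Nat) (res : List (Int × Int)),
      altGo (m : Int) (b + 1) (some ((2:Int) ^ a)) res =
        res ++ mgo a b ((bitsL m).map (· + (b + 1)))) := by
  intro m
  induction m using Nat.strong_induction_on with
  | _ m IH =>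
  have hmod : PySem.Int.mod (m : Int) 2 = ((m % 2 : Nat) : Int) := by
    rw [PySem.Int.mod_eq_emod_of_pos (by norm_num)]; omega
  have hdiv : PySem.Int.floordiv (m : Int) 2 = ((m / 2 : Nat) : Int) := by
    rw [PySem.Int.floordiv_eq_ediv_of_pos (by norm_num)]; omega
  by_cases h0 : m = 0
  · subst h0
    constructor
    · intro p res; rw [altGo]; simp [bitsL, mergePos]
    · intro a b res; rw [altGo]; simp [bitsL, mgo]
  · have hpos : (0:Int) < (m : Int) := by exact_mod_cast Nat.pos_of_ne_zero h0
    have IH2 := IH (m / 2) (by omega)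
    constructor
    · intro p res
      rw [altGo, if_pos hpos, hmod, hdiv]
      by_cases hodd : m % 2 = 1
      · rw [if_pos (by rw [hodd]; norm_num)]
        show altGo ((m / 2 : Nat) : Int) (p + 1) (some ((2:Int) ^ p)) res = _
        rw [IH2.2 p p res]
        conv_rhs => rw [bitsL, if_neg h0, if_pos hodd]
        simp only [List.map_cons, List.singleton_append, Nat.zero_add, map_shift]
        rfl
      · rw [if_neg (by
          intro hcon
          have : m % 2 = 1 := by exact_mod_cast hcon
          exact hodd this)]
        show altGo ((m / 2 : Nat) : Int) (p + 1) none res = _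
        rw [IH2.1 (p + 1) res]
        conv_rhs => rw [bitsL, if_neg h0, if_neg hodd]
        simp only [List.nil_append, map_shift]
    · intro a b res
      rw [altGo, if_pos hpos, hmod, hdiv]
      by_cases hodd : m % 2 = 1
      · rw [if_pos (by rw [hodd]; norm_num)]
        show altGo ((m / 2 : Nat) : Int) (b + 1 + 1) (some ((2:Int) ^ a)) res = _
        rw [IH2.2 a (b + 1) res]
        conv_rhs => rw [bitsL, if_neg h0, if_pos hodd]
        simp only [List.map_cons, List.singleton_append, Nat.zero_add, map_shift]
        rw [mgo, if_pos rfl]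
      · rw [if_neg (by
          intro hcon
          have : m % 2 = 1 := by exact_mod_cast hcon
          exact hodd this)]
        show altGo ((m / 2 : Nat) : Int) (b + 1 + 1) none (res ++ [((2:Int) ^ a, (2:Int) ^ (b + 1) - 1)]) = _
        rw [IH2.1 (b + 1 + 1) (res ++ [((2:Int) ^ a, (2:Int) ^ (b + 1) - 1)])]
        conv_rhs => rw [bitsL, if_neg h0, if_neg hodd]
        simp only [List.nil_append, map_shift]
        rw [mgo_of_gt a b ((bitsL (m / 2)).map (· + (b + 1 + 1))) (by
          intro q hq
          simp only [List.mem_map] at hq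
          obtain ⟨r, _, hr⟩ := hq
          omega)]
        simp

lemma count_alt_eq (m : Nat) : count_alt (m : Int) = mergePos (bitsL m) := by
  have h := (altGo_inv m).1 0 []
  simpa [count_alt] using h

lemma count_eq (m : Nat) (hm : 1 ≤ m) : count (m : Int) = mergePos (bitsL m) := by
  rw [count]
  have hrange : PySem.List.pyRange 1 (10 * (m : Int) + 1) 1 =
      (List.range' 1 (10 * m)).map (fun (j : Nat) => (j : Int)) := by
    rw [PySem.List.pyRange_one, List.range'_eq_map_range, List.map_map]
    rw [show ((10 * (m : Int) + 1 - 1).toNat) = 10 * m by omega]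
    apply List.map_congr_left
    intro k _
    simp
  rw [hrange, List.filter_map]
  have hpred : ((fun i => decide (PySem.Int.bxor i (m : Int) < (m : Int))) ∘ (fun (j : Nat) => (j : Int)))
      = fun (j : Nat) => decide ((j ^^^ m) < m) := by
    funext j
    simp only [Function.comp_apply, PySem.Int.bxor_natCast]
    simp
  rw [hpred, valsNat m hm, runsA_blocks _ (bits_pairwise m)]

-- ===== VERDICT (by name: the statement is the Claim_ definition above) =====
theorem count_spec : Claim_equal_count := by
  intro n _
  unfold Spec_count
  by_cases h : 0 < n
  · lift n to ℕ using h.le with m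
    have hm : 1 ≤ m := by exact_mod_cast h
    rw [count_eq m hm, count_alt_eq m]
  · have h1 : (10 * n + 1 : Int) ≤ 1 := by nlinarith
    rw [count, count_alt]
    rw [PySem.List.pyRange_one_eq_nil h1]
    rw [altGo]
    simp [runsA, h]
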